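-- pv_equiv track=rewrite | github.com/jskim7018/leetcode_study | algorithm_study/2026/03/20260316/medium/LC_3871.py | countCommas
-- ===== SOURCE A (Python) =====
-- def countCommas(n: int) -> int:
--     # If n is less than 1000 then answer is 0
--
--     curr = 1_000
--     comma_cnt = 1
--
--     ans = 0
--     while n >= curr:
--         ans += comma_cnt * ((min((curr*1000)-1, n)+1) - curr)
--         curr *= 10**3
--         comma_cnt += 1
--
--     return ans
-- ===== SOURCE B (Python) =====
-- def countCommas(n: int) -> int:
--     # Closed form: the answer is sum over i>=1 with 1000**i <= n of (n + 1 - 1000**i).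
--     # d = number of such powers (the "thousand-scale" of n), then geometric-series sum.
--     d = 0
--     m = n
--     while m >= 1000:
--         m //= 1000
--         d += 1
--     return d * (n + 1) - (1000 ** (d + 1) - 1000) // 999
-- ===== Notes on version B (the rewrite author's own statement) =====
-- stated objective: alternative
-- what changed: A accumulates per-band weighted counts with min() while stepping curr through powers of 1000; B only counts the thousand-scale d of n (repeated //= 1000) and returns the geometric-series closed form d*(n+1) - (1000**(d+1) - 1000)//999.
import Mathlib
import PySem

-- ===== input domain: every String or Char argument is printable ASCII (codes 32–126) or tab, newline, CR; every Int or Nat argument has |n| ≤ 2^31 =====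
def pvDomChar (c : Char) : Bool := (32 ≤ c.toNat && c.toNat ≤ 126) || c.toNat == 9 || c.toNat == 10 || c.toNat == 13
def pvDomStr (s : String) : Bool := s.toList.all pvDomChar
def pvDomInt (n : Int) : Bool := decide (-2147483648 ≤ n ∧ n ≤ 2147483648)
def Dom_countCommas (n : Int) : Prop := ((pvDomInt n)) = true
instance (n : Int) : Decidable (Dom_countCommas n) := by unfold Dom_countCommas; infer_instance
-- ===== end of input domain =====

-- B replaces A's weighted band-accumulation loop by a scale count (m //= 1000) and a
-- geometric-series closed form; objective: alternative (not claimed faster).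

-- ===== PORT A =====
-- while n >= curr: ans += comma_cnt * ((min(curr*1000-1, n)+1) - curr); curr *= 1000; comma_cnt += 1
-- (hc : 0 < curr is only the termination invariant; curr starts at 1000)
def countCommasLoop (n : Int) (curr : Int) (hc : 0 < curr) (comma_cnt ans : Int) : Int :=
  if n ≥ curr then
    countCommasLoop n (curr * 1000) (by positivity)
      (comma_cnt + 1) (ans + comma_cnt * ((min (curr * 1000 - 1) n + 1) - curr))
  else ans
termination_by (n + 1 - curr).toNat
decreasing_by omega

def countCommas (n : Int) : Int := countCommasLoop n 1000 (by norm_num) 1 0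

-- ===== PORT B =====
-- while m >= 1000: m //= 1000; d += 1
def countCommasAltLoop (m : Int) (d : Nat) : Nat :=
  if h : m ≥ 1000 then countCommasAltLoop (PySem.Int.floordiv m 1000) (d + 1) else d
termination_by m.toNat
decreasing_by
  have h1 : PySem.Int.floordiv m 1000 < m := by
    rw [PySem.Int.floordiv_lt_iff_lt_mul (by norm_num)]; nlinarith
  omega

-- d is a nonnegative Python int (a loop counter), ported as Nat; 1000 ** (d+1) is
-- integer exponentiation with that nonnegative exponent.
def countCommas_alt (n : Int) : Int :=
  let d : Nat := countCommasAltLoop n 0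
  (d : Int) * (n + 1) - PySem.Int.floordiv ((1000:Int) ^ (d + 1) - 1000) 999

-- ===== PRECONDITION & SPEC =====
def Spec_countCommas (n : Int) (out : Int) : Prop := out = countCommas_alt n
instance (n : Int) (out : Int) : Decidable (Spec_countCommas n out) := by unfold Spec_countCommas; infer_instance

-- ===== CLAIM (what is proved, stated in full; the proofs are below) =====
def Claim_equal_countCommas : Prop := ∀ (n : Int), Dom_countCommas n → Spec_countCommas n (countCommas n)

-- ===== LEMMAS AND PROOFS =====

theorem altLoop_of_lt (m : Int) (d : Nat) (h : m < 1000) : countCommasAltLoop m d = d := by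
  rw [countCommasAltLoop]; simp [not_le.mpr h]

theorem altLoop_step (m : Int) (d : Nat) (h : 1000 ≤ m) :
    countCommasAltLoop m d = countCommasAltLoop (PySem.Int.floordiv m 1000) (d + 1) := by
  rw [countCommasAltLoop]; simp [h]

theorem fd1000_bounds (m lo hi : Int) (hlo : lo * 1000 ≤ m) (hhi : m < (hi + 1) * 1000) :
    lo ≤ PySem.Int.floordiv m 1000 ∧ PySem.Int.floordiv m 1000 ≤ hi := by
  constructor
  · rw [PySem.Int.le_floordiv_iff_mul_le (by norm_num)]; exact hlo
  · have := (PySem.Int.floordiv_lt_iff_lt_mul (a := m) (b := 1000) (q := hi + 1)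
      (by norm_num)).mpr hhi
    omega

theorem countCommas_spec' (n : Int) (hd : Dom_countCommas n) :
    countCommas n = countCommas_alt n := by
  have hn : n ≤ 2147483648 := by
    simp [Dom_countCommas, pvDomInt] at hd; omega
  unfold countCommas countCommas_alt
  by_cases h1 : n < 1000
  · rw [countCommasLoop, if_neg (by omega), altLoop_of_lt _ _ h1]
    simp
  · rw [not_lt] at h1
    rw [altLoop_step _ _ h1]
    by_cases h2 : n < 1000000
    · obtain ⟨hc1, hc1'⟩ := fd1000_bounds n 1 999 (by omega) (by omega)
      rw [countCommasLoop, if_pos (by omega), countCommasLoop, if_neg (by omega),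
          altLoop_of_lt _ _ (by omega)]
      have hmin : min ((1000:Int) * 1000 - 1) n = n := by omega
      have e : PySem.Int.floordiv ((1000:Int) ^ (1 + 1) - 1000) 999 = 1000 := by decide
      rw [hmin]
      simp only [e]
      push_cast
      ring
    · rw [not_lt] at h2
      obtain ⟨hm1, hm1'⟩ := fd1000_bounds n 1000 2147483 (by omega) (by omega)
      rw [altLoop_step _ _ (by omega : (1000:Int) ≤ PySem.Int.floordiv n 1000)]
      by_cases h3 : n < 1000000000
      · obtain ⟨hm1c, hm1c'⟩ := fd1000_bounds n 1000 999999 (by omega) (by omega)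
        obtain ⟨hm2, hm2'⟩ := fd1000_bounds (PySem.Int.floordiv n 1000) 1 999 (by omega) (by omega)
        rw [countCommasLoop, if_pos (by omega), countCommasLoop, if_pos (by omega),
            countCommasLoop, if_neg (by omega),
            altLoop_of_lt _ _ (by omega)]
        have hmin1 : min ((1000:Int) * 1000 - 1) n = 1000 * 1000 - 1 := by omega
        have hmin2 : min ((1000:Int) * 1000 * 1000 - 1) n = n := by omega
        have e : PySem.Int.floordiv ((1000:Int) ^ (2 + 1) - 1000) 999 = 1001000 := by decide
        rw [hmin1, hmin2]
        simp only [e]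
        push_cast
        ring
      · rw [not_lt] at h3
        obtain ⟨hm1b, _⟩ := fd1000_bounds n 1000000 2147483 (by omega) (by omega)
        obtain ⟨hm2b, hm2b'⟩ := fd1000_bounds (PySem.Int.floordiv n 1000) 1000 2147
          (by omega) (by omega)
        rw [altLoop_step _ _ (by omega : (1000:Int) ≤
              PySem.Int.floordiv (PySem.Int.floordiv n 1000) 1000)]
        obtain ⟨hm3, hm3'⟩ := fd1000_bounds
          (PySem.Int.floordiv (PySem.Int.floordiv n 1000) 1000) 1 999 (by omega) (by omega)
        rw [countCommasLoop, if_pos (by omega), countCommasLoop, if_pos (by omega),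
            countCommasLoop, if_pos (by omega), countCommasLoop, if_neg (by omega),
            altLoop_of_lt _ _ (by omega)]
        have hmin1 : min ((1000:Int) * 1000 - 1) n = 1000 * 1000 - 1 := by omega
        have hmin2 : min ((1000:Int) * 1000 * 1000 - 1) n = 1000 * 1000 * 1000 - 1 := by omega
        have hmin3 : min ((1000:Int) * 1000 * 1000 * 1000 - 1) n = n := by omega
        have e : PySem.Int.floordiv ((1000:Int) ^ (3 + 1) - 1000) 999 = 1001001000 := by decide
        rw [hmin1, hmin2, hmin3]
        simp only [e]
        push_cast
        ring

-- ===== VERDICT (by name: the statement is the Claim_ definition above) =====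
theorem countCommas_spec : Claim_equal_countCommas := by
  intro n hd
  exact countCommas_spec' n hd
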